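-- pv_equiv track=rewrite | github.com/adex0812/helpdesk_cga | dashboard/views.py | calculate_status_totals
-- ===== SOURCE A (Python) =====
-- def calculate_status_totals(summary_data):
--     """Calculate total counts for each status"""
--     totals = {
--         'pending': 0,
--         'in_progress': 0,
--         'done': 0,
--         'rejected': 0
--     }
--
--     for item in summary_data:
--         totals['pending'] += item.get('pending', 0)
--         totals['in_progress'] += item.get('in_progress', 0)
--         totals['done'] += item.get('done', 0)
--         totals['rejected'] += item.get('rejected', 0)
--
--     return totals
-- ===== SOURCE B (Python) =====
-- def calculate_status_totals(summary_data):
--     """Calculate total counts for each status"""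
--     return {
--         status: sum(item.get(status, 0) for item in summary_data)
--         for status in ('pending', 'in_progress', 'done', 'rejected')
--     }
-- ===== Notes on version B (the rewrite author's own statement) =====
-- stated objective: idiomatic
-- what changed: Replaced the mutable-accumulator loop (one pass updating all four keys) with a dict comprehension over the four status names, each total computed by an independent sum over the data (transposed traversal: outer over statuses, inner over items).
import Mathlib
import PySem

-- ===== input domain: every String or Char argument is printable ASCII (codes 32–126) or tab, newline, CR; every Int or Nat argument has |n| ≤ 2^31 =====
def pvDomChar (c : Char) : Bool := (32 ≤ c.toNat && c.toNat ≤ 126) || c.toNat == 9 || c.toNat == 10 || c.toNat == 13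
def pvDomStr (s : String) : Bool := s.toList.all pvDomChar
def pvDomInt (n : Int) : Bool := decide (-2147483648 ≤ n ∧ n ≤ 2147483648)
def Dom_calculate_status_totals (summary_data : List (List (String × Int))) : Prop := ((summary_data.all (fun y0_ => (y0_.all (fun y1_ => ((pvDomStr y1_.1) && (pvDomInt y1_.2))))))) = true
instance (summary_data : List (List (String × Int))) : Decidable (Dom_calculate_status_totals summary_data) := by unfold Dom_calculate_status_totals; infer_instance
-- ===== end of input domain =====

-- B replaces A's single pass updating a four-key accumulator dict by a dict
-- comprehension over the four status names, each total summed in its own pass (idiomatic rewrite).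
-- ===== PORT A =====
-- item.get(k, 0): first-match lookup with default 0 on the association list (shared by both ports)
def pygetd0 (item : List (String × Int)) (k : String) : Int :=
  match item with
  | [] => 0
  | (k', v) :: rest => if k' == k then v else pygetd0 rest k

-- totals[k] += v on the insertion-ordered association list (overwrite in place)
def bump (totals : List (String × Int)) (k : String) (v : Int) : List (String × Int) :=
  totals.map (fun kv => if kv.1 == k then (kv.1, kv.2 + v) else kv)

def calculate_status_totals (summary_data : List (List (String × Int))) : List (String × Int) :=
  summary_data.foldl
    (fun totals item =>
      bump (bump (bump (bump totals "pending" (pygetd0 item "pending"))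
        "in_progress" (pygetd0 item "in_progress"))
        "done" (pygetd0 item "done"))
        "rejected" (pygetd0 item "rejected"))
    [("pending", 0), ("in_progress", 0), ("done", 0), ("rejected", 0)]

-- ===== PORT B =====
def calculate_status_totals_alt (summary_data : List (List (String × Int))) : List (String × Int) :=
  ["pending", "in_progress", "done", "rejected"].map
    (fun status => (status, summary_data.foldl (fun acc item => acc + pygetd0 item status) 0))

-- ===== PRECONDITION & SPEC =====
def Spec_calculate_status_totals (summary_data : List (List (String × Int))) (out : List (String × Int)) : Prop := out = calculate_status_totals_alt summary_data
instance (summary_data : List (List (String × Int))) (out : List (String × Int)) : Decidable (Spec_calculate_status_totals summary_data out) := by unfold Spec_calculate_status_totals; infer_instance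

-- ===== CLAIM (what is proved, stated in full; the proofs are below) =====
def Claim_equal_calculate_status_totals : Prop := ∀ (summary_data : List (List (String × Int))), Dom_calculate_status_totals summary_data → Spec_calculate_status_totals summary_data (calculate_status_totals summary_data)

-- ===== LEMMAS AND PROOFS =====
lemma foldl_totals (sd : List (List (String × Int))) (a b c d : Int) :
    sd.foldl
      (fun totals item =>
        bump (bump (bump (bump totals "pending" (pygetd0 item "pending"))
          "in_progress" (pygetd0 item "in_progress"))
          "done" (pygetd0 item "done"))
          "rejected" (pygetd0 item "rejected"))
      [("pending", a), ("in_progress", b), ("done", c), ("rejected", d)]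
    = [("pending", sd.foldl (fun acc item => acc + pygetd0 item "pending") a),
       ("in_progress", sd.foldl (fun acc item => acc + pygetd0 item "in_progress") b),
       ("done", sd.foldl (fun acc item => acc + pygetd0 item "done") c),
       ("rejected", sd.foldl (fun acc item => acc + pygetd0 item "rejected") d)] := by
  induction sd generalizing a b c d with
  | nil => rfl
  | cons item rest ih =>
    simp only [List.foldl_cons, bump, List.map, String.reduceEq, reduceIte]
    exact ih _ _ _ _

-- ===== VERDICT (by name: the statement is the Claim_ definition above) =====
theorem calculate_status_totals_spec : Claim_equal_calculate_status_totals := by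
  intro sd _
  unfold Spec_calculate_status_totals calculate_status_totals calculate_status_totals_alt
  rw [foldl_totals]
  rfl
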